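-- pv_equiv track=rewrite | github.com/DaniilSukhanov/snake-on-Python | technical.py | check_for_items_nearby
-- ===== SOURCE A (Python) =====
-- def check_for_items_nearby(snake_body, index_element):
--     """Проверяет, что нет ли соседних элементов.
--     Checks whether there are no neighboring elements."""
--     # Распаковка.
--     # Unpack.
--     direction_the_original, (row_the_original, col_the_original) = snake_body[index_element]
--     # Список направлений, по которым может стоять объект.
--     # List of directions in which the object can stand.
--     while_list_direction = {
--         '-col': ('+row', '-row'),
--         '+col': ('+row', '-row'),
--         '-row': ('+col', '-col'),
--         '+row': ('+col', '-col')
--     }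
--     # Перебираем "белые" направления.
--     # Going through the "white" directions.
--     for direction in while_list_direction[direction_the_original]:
--         new_coordinate_element = {
--             '-col': (row_the_original, col_the_original - 1),
--             '+col': (row_the_original, col_the_original + 1),
--             '-row': (row_the_original - 1, col_the_original),
--             '+row': (row_the_original + 1, col_the_original)
--         }
--         row, col = new_coordinate_element[direction]
--         if snake_body[index_element - 1][1] == (row, col):
--             return direction
--     return direction_the_original
-- ===== SOURCE B (Python) =====
-- def check_for_items_nearby(snake_body, index_element):
--     """Checks whether there are no neighboring elements (delta-based rewrite)."""
--     direction_the_original, (row, col) = snake_body[index_element]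
--     allowed = {
--         '-col': ('+row', '-row'),
--         '+col': ('+row', '-row'),
--         '-row': ('+col', '-col'),
--         '+row': ('+col', '-col')
--     }[direction_the_original]
--     prev_row, prev_col = snake_body[index_element - 1][1]
--     candidate = {
--         (1, 0): '+row', (-1, 0): '-row',
--         (0, 1): '+col', (0, -1): '-col'
--     }.get((prev_row - row, prev_col - col))
--     if candidate in allowed:
--         return candidate
--     return direction_the_original
-- ===== Notes on version B (the rewrite author's own statement) =====
-- stated objective: simpler
-- what changed: Instead of looping over the two allowed perpendicular directions and recomputing a coordinate table per iteration, B computes the previous segment's offset delta once and reverse-maps it through a fixed delta->direction dict, returning the candidate only if it lies in the allowed pair.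
import Mathlib
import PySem

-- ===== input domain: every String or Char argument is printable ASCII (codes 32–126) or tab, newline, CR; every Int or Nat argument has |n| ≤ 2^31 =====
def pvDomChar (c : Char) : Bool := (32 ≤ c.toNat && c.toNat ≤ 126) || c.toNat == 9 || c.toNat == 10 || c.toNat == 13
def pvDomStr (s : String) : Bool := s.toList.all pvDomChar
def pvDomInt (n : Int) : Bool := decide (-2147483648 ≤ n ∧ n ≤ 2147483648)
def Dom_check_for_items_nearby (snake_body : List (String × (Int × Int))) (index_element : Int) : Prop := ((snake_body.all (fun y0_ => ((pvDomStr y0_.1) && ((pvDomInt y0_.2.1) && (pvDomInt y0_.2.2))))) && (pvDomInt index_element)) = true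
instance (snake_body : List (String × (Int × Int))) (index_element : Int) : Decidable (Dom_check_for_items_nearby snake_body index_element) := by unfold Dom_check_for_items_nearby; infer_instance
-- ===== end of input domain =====

-- B replaces A's loop over the allowed pair (with a per-iteration coordinate table) by one
-- delta computation reverse-mapped through a fixed delta->direction dict; objective: simpler.

-- ===== PORT A =====
-- the `for direction in while_list_direction[...]` loop of A, over the remaining directions
def pvLoopA (snake_body : List (String × (Int × Int))) (index_element : Int)
    (row0 col0 : Int) (d0 : String) : List String → String
  | [] => d0
  | direction :: rest =>
    let new_coordinate_element : PySem.Dict String (Int × Int) :=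
      PySem.Dict.ofList [("-col", (row0, col0 - 1)), ("+col", (row0, col0 + 1)),
                         ("-row", (row0 - 1, col0)), ("+row", (row0 + 1, col0))]
    match new_coordinate_element.get? direction with
    | none => ""  -- KeyError (unreachable: direction is one of the four keys)
    | some rc =>
      match PySem.List.pyGet? snake_body (index_element - 1) with
      | none => ""  -- IndexError, excluded by Pre_
      | some prev =>
        if prev.2 == rc then direction
        else pvLoopA snake_body index_element row0 col0 d0 rest

def check_for_items_nearby (snake_body : List (String × (Int × Int))) (index_element : Int) : String :=
  match PySem.List.pyGet? snake_body index_element with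
  | none => ""  -- IndexError, excluded by Pre_
  | some (direction_the_original, (row0, col0)) =>
    let while_list_direction : PySem.Dict String (String × String) :=
      PySem.Dict.ofList [("-col", ("+row", "-row")), ("+col", ("+row", "-row")),
                         ("-row", ("+col", "-col")), ("+row", ("+col", "-col"))]
    match while_list_direction.get? direction_the_original with
    | none => ""  -- KeyError, excluded by Pre_
    | some (d1, d2) => pvLoopA snake_body index_element row0 col0 direction_the_original [d1, d2]

-- ===== PORT B =====
def check_for_items_nearby_alt (snake_body : List (String × (Int × Int))) (index_element : Int) : String :=
  match PySem.List.pyGet? snake_body index_element with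
  | none => ""  -- IndexError, excluded by Pre_
  | some (direction_the_original, (row0, col0)) =>
    match (PySem.Dict.ofList [("-col", ("+row", "-row")), ("+col", ("+row", "-row")),
                              ("-row", ("+col", "-col")), ("+row", ("+col", "-col"))]
           : PySem.Dict String (String × String)).get? direction_the_original with
    | none => ""  -- KeyError, excluded by Pre_
    | some allowed =>
      match PySem.List.pyGet? snake_body (index_element - 1) with
      | none => ""  -- IndexError, excluded by Pre_
      | some prev =>
        let candidate : Option String :=
          (PySem.Dict.ofList [((1, 0), "+row"), ((-1, 0), "-row"), ((0, 1), "+col"), ((0, -1), "-col")]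
           : PySem.Dict (Int × Int) String).get? (prev.2.1 - row0, prev.2.2 - col0)
        match candidate with
        | some c => if c == allowed.1 || c == allowed.2 then c else direction_the_original
        | none => direction_the_original

-- ===== PRECONDITION & SPEC =====
-- Pre_ excludes exactly the inputs on which A raises: an out-of-range index_element or
-- index_element - 1 (IndexError), or a direction string outside the four keys (KeyError).
def Pre_check_for_items_nearby (snake_body : List (String × (Int × Int))) (index_element : Int) : Prop :=
  PySem.Raise.InRange snake_body.length index_element ∧
  PySem.Raise.InRange snake_body.length (index_element - 1) ∧
  ((PySem.List.pyGet? snake_body index_element).all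
    (fun e => e.1 == "-col" || e.1 == "+col" || e.1 == "-row" || e.1 == "+row")) = true
instance (snake_body : List (String × (Int × Int))) (index_element : Int) : Decidable (Pre_check_for_items_nearby snake_body index_element) := by unfold Pre_check_for_items_nearby; infer_instance

def pvWitness_check_for_items_nearby : (List (String × (Int × Int))) × Int :=
  ([("+row", (0, 0)), ("-col", (1, 0))], 1)

def Spec_check_for_items_nearby (snake_body : List (String × (Int × Int))) (index_element : Int) (out : String) : Prop := out = check_for_items_nearby_alt snake_body index_element
instance (snake_body : List (String × (Int × Int))) (index_element : Int) (out : String) : Decidable (Spec_check_for_items_nearby snake_body index_element out) := by unfold Spec_check_for_items_nearby; infer_instance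

-- ===== CLAIM (what is proved, stated in full; the proofs are below) =====
def Claim_equal_check_for_items_nearby : Prop := ∀ (snake_body : List (String × (Int × Int))) (index_element : Int), Dom_check_for_items_nearby snake_body index_element → Pre_check_for_items_nearby snake_body index_element → Spec_check_for_items_nearby snake_body index_element (check_for_items_nearby snake_body index_element)

-- ===== LEMMAS AND PROOFS =====

-- ===== VERDICT (by name: the statement is the Claim_ definition above) =====
-- evaluation lemmas for the literal dict lookups in both ports
lemma pv_wld_mcol : (PySem.Dict.ofList [("-col", ("+row", "-row")), ("+col", ("+row", "-row")), ("-row", ("+col", "-col")), ("+row", ("+col", "-col"))] : PySem.Dict String (String × String)).get? "-col" = some ("+row", "-row") := rfl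
lemma pv_wld_pcol : (PySem.Dict.ofList [("-col", ("+row", "-row")), ("+col", ("+row", "-row")), ("-row", ("+col", "-col")), ("+row", ("+col", "-col"))] : PySem.Dict String (String × String)).get? "+col" = some ("+row", "-row") := rfl
lemma pv_wld_mrow : (PySem.Dict.ofList [("-col", ("+row", "-row")), ("+col", ("+row", "-row")), ("-row", ("+col", "-col")), ("+row", ("+col", "-col"))] : PySem.Dict String (String × String)).get? "-row" = some ("+col", "-col") := rfl
lemma pv_wld_prow : (PySem.Dict.ofList [("-col", ("+row", "-row")), ("+col", ("+row", "-row")), ("-row", ("+col", "-col")), ("+row", ("+col", "-col"))] : PySem.Dict String (String × String)).get? "+row" = some ("+col", "-col") := rfl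
lemma pv_coord_mcol (r0 c0 : Int) : (PySem.Dict.ofList [("-col", (r0, c0 - 1)), ("+col", (r0, c0 + 1)), ("-row", (r0 - 1, c0)), ("+row", (r0 + 1, c0))] : PySem.Dict String (Int × Int)).get? "-col" = some (r0, c0 - 1) := rfl
lemma pv_coord_pcol (r0 c0 : Int) : (PySem.Dict.ofList [("-col", (r0, c0 - 1)), ("+col", (r0, c0 + 1)), ("-row", (r0 - 1, c0)), ("+row", (r0 + 1, c0))] : PySem.Dict String (Int × Int)).get? "+col" = some (r0, c0 + 1) := rfl
lemma pv_coord_mrow (r0 c0 : Int) : (PySem.Dict.ofList [("-col", (r0, c0 - 1)), ("+col", (r0, c0 + 1)), ("-row", (r0 - 1, c0)), ("+row", (r0 + 1, c0))] : PySem.Dict String (Int × Int)).get? "-row" = some (r0 - 1, c0) := rfl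
lemma pv_coord_prow (r0 c0 : Int) : (PySem.Dict.ofList [("-col", (r0, c0 - 1)), ("+col", (r0, c0 + 1)), ("-row", (r0 - 1, c0)), ("+row", (r0 + 1, c0))] : PySem.Dict String (Int × Int)).get? "+row" = some (r0 + 1, c0) := rfl

lemma pv_delta_get (p : Int × Int) :
    (PySem.Dict.ofList [((1, 0), "+row"), ((-1, 0), "-row"), ((0, 1), "+col"), ((0, -1), "-col")]
      : PySem.Dict (Int × Int) String).get? p =
    if ((1 : Int), (0 : Int)) = p then some "+row"
    else if ((-1 : Int), (0 : Int)) = p then some "-row"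
    else if ((0 : Int), (1 : Int)) = p then some "+col"
    else if ((0 : Int), (-1 : Int)) = p then some "-col" else none := by
  have h : (PySem.Dict.ofList [((1, 0), "+row"), ((-1, 0), "-row"), ((0, 1), "+col"), ((0, -1), "-col")]
      : PySem.Dict (Int × Int) String) =
      PySem.Dict.mk [((1, 0), "+row"), ((-1, 0), "-row"), ((0, 1), "+col"), ((0, -1), "-col")] := rfl
  rw [h]
  split_ifs with a b c d
  · rw [← a]; rfl
  · rw [← b]; rfl
  · rw [← c]; rfl
  · rw [← d]; rfl
  · simp [PySem.Dict.get?, beq_iff_eq, a, b, c, d]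

set_option maxHeartbeats 1000000 in
theorem check_for_items_nearby_spec : Claim_equal_check_for_items_nearby := by
  intro sb i hDom hPre
  clear hDom
  obtain ⟨h1, h2, h3⟩ := hPre
  unfold Spec_check_for_items_nearby
  rcases hg : PySem.List.pyGet? sb i with _ | ⟨d0, r0, c0⟩
  · exact absurd hg (by simp [PySem.List.pyGet?_eq_none_iff, h1])
  rcases hp : PySem.List.pyGet? sb (i - 1) with _ | ⟨dp, pr, pc⟩
  · exact absurd hp (by simp [PySem.List.pyGet?_eq_none_iff, h2])
  rw [hg] at h3
  simp only [Option.all_some, Bool.or_eq_true, beq_iff_eq] at h3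
  rcases h3 with ((h | h) | h) | h <;> subst h <;>
    simp only [check_for_items_nearby, check_for_items_nearby_alt, hg, hp, pvLoopA,
      pv_wld_mcol, pv_wld_pcol, pv_wld_mrow, pv_wld_prow,
      pv_coord_mcol, pv_coord_pcol, pv_coord_mrow, pv_coord_prow, pv_delta_get,
      beq_iff_eq, Prod.mk.injEq] <;>
    (clear h1 h2 hg hp; split_ifs <;> first | (exfalso; omega) | rfl)
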